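-- pv_equiv track=rewrite | github.com/Detzy/child_poet | obstacle_detector/cluster_reducer.py | make_cluster_values_adjacent
-- ===== SOURCE A (Python) =====
-- def make_cluster_values_adjacent(in_clustering):
--     """
--     Reduces a cluster distribution to one where every cluster number is adjacent to another, starting at 0.
--     This means that if there are n=10 clusters, every cluster will be guaranteed to be the values 0 to 9.
--
--     Parameters
--     ----------
--     in_clustering  :    list
--                         1D list with assigned cluster labels
--
--     Returns
--     -------
--     out_clustering  :   list
--                         1D list of same length as input_clustering, but with adjacent cluster values
--     """
--     out_clustering = in_clustering.copy()
--
--     next_cluster = 0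
--     for i in range(max(in_clustering) + 1):
--         if i in in_clustering:
--             out_clustering = [next_cluster if c == i else c for c in out_clustering]
--             next_cluster += 1
--
--     return out_clustering
-- ===== SOURCE B (Python) =====
-- def make_cluster_values_adjacent(in_clustering):
--     rank = {v: r for r, v in enumerate(sorted(set(v for v in in_clustering if v >= 0)))}
--     return [rank.get(v, v) for v in in_clustering]
-- ===== Notes on version B (the rewrite author's own statement) =====
-- stated objective: faster
-- what changed: Replaces the loop over every integer 0..max(xs) with a rebuild of the whole list per hit by a rank dict over the sorted distinct nonnegative values and a single remap pass.
import Mathlib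
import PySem

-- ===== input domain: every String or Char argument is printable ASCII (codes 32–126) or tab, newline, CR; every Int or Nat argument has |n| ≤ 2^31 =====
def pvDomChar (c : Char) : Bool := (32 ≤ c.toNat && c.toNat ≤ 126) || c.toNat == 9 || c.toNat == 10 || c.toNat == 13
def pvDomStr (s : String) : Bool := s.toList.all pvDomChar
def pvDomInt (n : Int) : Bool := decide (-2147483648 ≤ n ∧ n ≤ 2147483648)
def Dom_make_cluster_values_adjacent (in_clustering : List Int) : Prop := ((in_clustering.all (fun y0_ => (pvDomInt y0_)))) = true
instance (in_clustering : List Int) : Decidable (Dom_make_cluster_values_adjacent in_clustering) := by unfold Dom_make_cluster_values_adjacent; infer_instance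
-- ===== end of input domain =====

-- B replaces A's sweep over every integer 0..max(xs) (rebuilding the list at each present value)
-- by a rank dictionary over the sorted distinct nonnegative values and one remap pass (objective: faster).


-- ===== PORT A =====
-- literal port of A: out = copy of input; for i in range(max(in)+1): if i in in: remap i -> next_cluster, next_cluster += 1
-- (max of an empty list raises ValueError in Python = max? none here; excluded by Pre_, the [] result is never claimed)
def make_cluster_values_adjacent (in_clustering : List Int) : List Int :=
  match PySem.List.max? in_clustering (fun x => x) with
  | none => []
  | some m =>
    ((PySem.List.pyRange 0 (m + 1) 1).foldl
      (fun (st : List Int × Int) i =>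
        if i ∈ in_clustering then
          (st.1.map (fun c => if c = i then st.2 else c), st.2 + 1)
        else st)
      (in_clustering, 0)).1

-- ===== PORT B =====
-- literal port of B: rank = {v: r for r, v in enumerate(sorted(set(v for v in in if v >= 0)))}; [rank.get(v, v) for v in in]
def make_cluster_values_adjacent_alt (in_clustering : List Int) : List Int :=
  let rank : PySem.Dict Int Int :=
    (PySem.List.enumerate
        (PySem.List.sorted (PySem.Set.ofList (in_clustering.filter (fun v => 0 ≤ v))) (fun x => x) false)
        0).foldl
      (fun d p => d.insert p.2 p.1) PySem.Dict.empty
  in_clustering.map (fun v => rank.getD v v)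

-- ===== PRECONDITION & SPEC =====
-- A raises ValueError on the empty list (max of empty sequence); that is the only exception.
def Pre_make_cluster_values_adjacent (in_clustering : List Int) : Prop := in_clustering ≠ []
instance (in_clustering : List Int) : Decidable (Pre_make_cluster_values_adjacent in_clustering) := by unfold Pre_make_cluster_values_adjacent; infer_instance
def pvWitness_make_cluster_values_adjacent : List Int := [3, 5, 3, -2, 0]

def Spec_make_cluster_values_adjacent (in_clustering : List Int) (out : List Int) : Prop := out = make_cluster_values_adjacent_alt in_clustering
instance (in_clustering : List Int) (out : List Int) : Decidable (Spec_make_cluster_values_adjacent in_clustering out) := by unfold Spec_make_cluster_values_adjacent; infer_instance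

-- ===== CLAIM (what is proved, stated in full; the proofs are below) =====
def Claim_equal_make_cluster_values_adjacent : Prop := ∀ (in_clustering : List Int), Dom_make_cluster_values_adjacent in_clustering → Pre_make_cluster_values_adjacent in_clustering → Spec_make_cluster_values_adjacent in_clustering (make_cluster_values_adjacent in_clustering)

-- ===== LEMMAS AND PROOFS =====

-- rI l v = number of integers j with 0 ≤ j < v that occur in l  (= the rank both programs assign to a present value v ≥ 0)
def rI (l : List Int) (v : Int) : Int := ((PySem.List.pyRange 0 v 1).countP (fun j => decide (j ∈ l)) : Int)

-- the common value both programs compute at each position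
def specF (l : List Int) (v : Int) : Int := if 0 ≤ v then rI l v else v

-- the remap A's loop applies after having processed the values 0, …, i-1
def gF (l : List Int) (i v : Int) : Int := if 0 ≤ v ∧ v < i ∧ v ∈ l then rI l v else v

-- B's sorted distinct nonnegative values
def sortedS (l : List Int) : List Int :=
  PySem.List.sorted (PySem.Set.ofList (l.filter (fun v => 0 ≤ v))) (fun x => x) false

lemma rI_zero (l : List Int) : rI l 0 = 0 := by
  simp [rI, PySem.List.pyRange_one_eq_nil le_rfl]

lemma rI_le (l : List Int) (v : Int) (hv : 0 ≤ v) : rI l v ≤ v := by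
  have h := List.countP_le_length (l := PySem.List.pyRange 0 v 1) (p := fun j => decide (j ∈ l))
  have hlen := PySem.List.length_pyRange_one 0 v
  unfold rI
  omega

lemma rI_succ (l : List Int) (a : Int) (ha : 0 ≤ a) :
    rI l (a + 1) = rI l a + (if a ∈ l then 1 else 0) := by
  unfold rI
  rw [PySem.List.pyRange_one_succ_right ha, List.countP_append]
  by_cases h : a ∈ l <;> simp [h]

lemma A_loop (l : List Int) (n : Nat) : ∀ (a : Int), 0 ≤ a →
    (PySem.List.pyRange a (a + n) 1).foldl
      (fun (st : List Int × Int) i =>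
        if i ∈ l then (st.1.map (fun c => if c = i then st.2 else c), st.2 + 1) else st)
      (l.map (gF l a), rI l a)
    = (l.map (gF l (a + n)), rI l (a + n)) := by
  induction n with
  | zero => intro a _; simp [PySem.List.pyRange_one_eq_nil (le_refl a)]
  | succ n ih =>
    intro a ha
    have hlt : a < a + (n + 1 : Nat) := by push_cast; omega
    rw [PySem.List.pyRange_one_cons hlt, List.foldl_cons]
    have hstep :
        (if a ∈ l then ((l.map (gF l a)).map (fun c => if c = a then rI l a else c), rI l a + 1)
         else (l.map (gF l a), rI l a))
        = (l.map (gF l (a + 1)), rI l (a + 1)) := by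
      by_cases hmem : a ∈ l
      · simp only [if_pos hmem, Prod.mk.injEq]
        refine ⟨?_, ?_⟩
        · rw [List.map_map]
          apply List.map_congr_left
          intro v hv
          simp only [Function.comp, gF]
          by_cases h1 : 0 ≤ v ∧ v < a ∧ v ∈ l
          · have hle : rI l v ≤ v := rI_le l v h1.1
            have : rI l v ≠ a := by omega
            have h2 : 0 ≤ v ∧ v < a + 1 ∧ v ∈ l := ⟨h1.1, by omega, h1.2.2⟩
            rw [if_pos h1, if_neg this, if_pos h2]
          · rw [if_neg h1]
            by_cases hva : v = a
            · subst hva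
              have h2 : 0 ≤ v ∧ v < v + 1 ∧ v ∈ l := ⟨ha, by omega, hmem⟩
              rw [if_pos rfl, if_pos h2]
            · have h2 : ¬ (0 ≤ v ∧ v < a + 1 ∧ v ∈ l) := by
                intro h2; exact h1 ⟨h2.1, by omega, h2.2.2⟩
              rw [if_neg hva, if_neg h2]
        · rw [rI_succ l a ha]; simp [hmem]
      · simp only [if_neg hmem, Prod.mk.injEq]
        refine ⟨?_, ?_⟩
        · apply List.map_congr_left
          intro v hv
          simp only [gF]
          have hva : v ≠ a := fun h => hmem (h ▸ hv)
          by_cases h1 : 0 ≤ v ∧ v < a ∧ v ∈ l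
          · have h2 : 0 ≤ v ∧ v < a + 1 ∧ v ∈ l := ⟨h1.1, by omega, h1.2.2⟩
            rw [if_pos h1, if_pos h2]
          · have h2 : ¬ (0 ≤ v ∧ v < a + 1 ∧ v ∈ l) := by
              intro h2; exact h1 ⟨h2.1, by omega, h2.2.2⟩
            rw [if_neg h1, if_neg h2]
        · rw [rI_succ l a ha]; simp [hmem]
    rw [hstep]
    have heq : a + (n + 1 : Nat) = (a + 1) + (n : Nat) := by push_cast; omega
    rw [heq]
    exact ih (a + 1) (by omega)

lemma A_eq_spec (l : List Int) (hne : l ≠ []) :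
    make_cluster_values_adjacent l = l.map (specF l) := by
  unfold make_cluster_values_adjacent
  obtain ⟨m, hm⟩ : ∃ m, PySem.List.max? l (fun x => x) = some m := by
    rcases h : PySem.List.max? l (fun x => x) with _ | m
    · exact absurd ((PySem.List.max?_eq_none_iff l (fun x => x)).mp h) hne
    · exact ⟨m, rfl⟩
  rw [hm]
  dsimp only
  have hmax : ∀ y ∈ l, y ≤ m := by
    intro y hy
    exact PySem.List.max?_isMax hm y hy
  by_cases hm0 : m + 1 ≤ 0
  · -- all values negative: empty range, list unchanged
    rw [PySem.List.pyRange_one_eq_nil hm0]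
    simp only [List.foldl_nil]
    conv_lhs => rw [show l = l.map id by simp]
    apply List.map_congr_left
    intro v hv
    have : ¬ 0 ≤ v := by have := hmax v hv; omega
    simp [specF, this]
  · have hinit1 : l = l.map (gF l 0) := by
      conv_lhs => rw [show l = l.map id by simp]
      apply List.map_congr_left
      intro v _
      simp only [id, gF]
      have : ¬ (0 ≤ v ∧ v < 0 ∧ v ∈ l) := by rintro ⟨h1, h2, _⟩; omega
      simp [this]
    have hinit2 : (0 : Int) = rI l 0 := (rI_zero l).symm
    have key := A_loop l (m + 1).toNat 0 le_rfl
    rw [show (0 : Int) + ((m + 1).toNat : Int) = m + 1 by omega] at key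
    rw [← hinit1, ← hinit2] at key
    rw [key]
    apply List.map_congr_left
    intro v hv
    simp only [gF, specF]
    by_cases h0 : 0 ≤ v
    · have : v < m + 1 := by have := hmax v hv; omega
      simp [h0, this, hv]
    · simp [h0]

-- ---- B side ----

lemma strict_mono_getElem {S : List Int} (hs : S.Pairwise (· < ·)) :
    ∀ p q (_ : p < q) (_ : q < S.length), S[p]'(by omega) < S[q] := by
  intro p q hpq hq
  exact List.pairwise_iff_getElem.mp hs p q (by omega) hq hpq

lemma idx_eq_rI (l : List Int) (S : List Int) (hs : S.Pairwise (· < ·))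
    (hmem : ∀ v, v ∈ S ↔ 0 ≤ v ∧ v ∈ l) :
    ∀ k (hk : k < S.length), (k : Int) = rI l (S[k]) := by
  intro k
  induction k with
  | zero =>
    intro hk
    have h0 : rI l S[0] = 0 := by
      unfold rI
      have : (PySem.List.pyRange 0 (S[0]) 1).countP (fun j => decide (j ∈ l)) = 0 := by
        apply List.countP_eq_zero.mpr
        intro j hj
        simp only [decide_eq_true_eq]
        intro hjl
        have hjr := (PySem.List.mem_pyRange_one).mp hj
        have hjS : j ∈ S := (hmem j).mpr ⟨hjr.1, hjl⟩
        obtain ⟨p, hp, rfl⟩ := List.getElem_of_mem hjS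
        rcases Nat.eq_zero_or_pos p with h | h
        · subst h; omega
        · have := strict_mono_getElem hs 0 p h hp; omega
      omega
    omega
  | succ k ih =>
    intro hk
    have hk' : k < S.length := by omega
    have hlt : S[k] < S[k + 1] := strict_mono_getElem hs k (k + 1) (by omega) hk
    have hk0 : 0 ≤ S[k] := ((hmem _).mp (List.getElem_mem hk')).1
    have hsplit : PySem.List.pyRange 0 (S[k + 1]) 1
        = PySem.List.pyRange 0 (S[k]) 1 ++ PySem.List.pyRange (S[k]) (S[k + 1]) 1 :=
      PySem.List.pyRange_one_append 0 (S[k]) (S[k + 1]) hk0 (by omega)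
    have hseg : (PySem.List.pyRange (S[k]) (S[k + 1]) 1).countP (fun j => decide (j ∈ l)) = 1 := by
      rw [PySem.List.pyRange_one_cons hlt, List.countP_cons]
      have h1 : S[k] ∈ l := ((hmem _).mp (List.getElem_mem hk')).2
      have h2 : (PySem.List.pyRange (S[k] + 1) (S[k + 1]) 1).countP (fun j => decide (j ∈ l)) = 0 := by
        apply List.countP_eq_zero.mpr
        intro j hj
        simp only [decide_eq_true_eq]
        intro hjl
        have hjr := (PySem.List.mem_pyRange_one).mp hj
        have hjS : j ∈ S := (hmem j).mpr ⟨by omega, hjl⟩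
        obtain ⟨p, hp, rfl⟩ := List.getElem_of_mem hjS
        rcases Nat.lt_or_ge k p with h | h
        · rcases Nat.lt_or_ge p (k + 1) with h' | h'
          · omega
          · rcases Nat.eq_or_lt_of_le h' with h'' | h''
            · subst h''; omega
            · have := strict_mono_getElem hs (k + 1) p h'' hp; omega
        · rcases Nat.eq_or_lt_of_le h with h'' | h''
          · subst h''; omega
          · have := strict_mono_getElem hs p k h'' hk'; omega
      simp [h1, h2]
    have hstep : rI l (S[k + 1]) = rI l (S[k]) + 1 := by
      unfold rI
      rw [hsplit, List.countP_append, hseg]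
      push_cast; ring
    rw [hstep, ← ih hk']
    push_cast; ring

lemma rank_getD (l S : List Int) (hs : S.Pairwise (· < ·))
    (hmem : ∀ v, v ∈ S ↔ 0 ≤ v ∧ v ∈ l) (v : Int) (hv : v ∈ l) :
    ((PySem.List.enumerate S 0).foldl (fun d p => d.insert p.2 p.1) PySem.Dict.empty).getD v v
      = specF l v := by
  have hnd : S.Nodup := hs.imp (fun h => ne_of_lt h)
  set rank : PySem.Dict Int Int :=
    (PySem.List.enumerate S 0).foldl (fun d p => d.insert p.2 p.1) PySem.Dict.empty with hrank
  have hitems : rank.items = (PySem.List.enumerate S 0).map (fun p => (p.2, p.1)) := by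
    have h := PySem.Dict.items_foldl_insert_fresh (ν := Int) (PySem.List.enumerate S 0)
        (fun p : Int × Int => p.2) (fun p : Int × Int => p.1) PySem.Dict.empty
        (by intro a _; exact PySem.Dict.contains_empty _)
        (by rw [PySem.List.map_snd_enumerate]; exact hnd)
    rw [hrank]
    simpa using h
  have hkeysnd : rank.keys.Nodup := by
    rw [hrank]
    exact PySem.Dict.nodup_keys_foldl_insert_key (PySem.List.enumerate S 0)
      (fun p : Int × Int => p.2) (fun _ p => p.1) PySem.Dict.empty
      (by simp [PySem.Dict.keys_empty])
  by_cases hvS : v ∈ S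
  · obtain ⟨k, hk, rfl⟩ := List.getElem_of_mem hvS
    have hpair : ((S[k] : Int), ((0 : Int) + (k : Nat))) ∈ rank.items := by
      rw [hitems]
      exact List.mem_map.mpr ⟨((0 : Int) + (k : Nat), S[k]),
        (PySem.List.mem_enumerate_iff _ _ _).mpr ⟨k, hk, rfl⟩, rfl⟩
    rw [PySem.Dict.getD_of_mem_items rank hpair hkeysnd]
    have h0 : 0 ≤ S[k] := ((hmem _).mp (List.getElem_mem hk)).1
    rw [specF, if_pos h0]
    rw [← idx_eq_rI l S hs hmem k hk]
    omega
  · have hkeys : (v ∈ rank.keys) ↔ v ∈ S := by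
      rw [hrank, PySem.Dict.keys_foldl_insert_key, PySem.List.map_snd_enumerate,
        PySem.Dict.keys_empty, PySem.Set.update_nil_left]
      exact PySem.Set.mem_ofList S v
    have hcon : rank.contains v = false := by
      by_cases h : rank.contains v = true
      · exact absurd (hkeys.mp ((PySem.Dict.contains_iff_mem_keys rank v).mp h)) hvS
      · simpa using h
    rw [PySem.Dict.getD_of_not_contains rank v hcon]
    have hneg : ¬ 0 ≤ v := by
      by_contra h
      exact hvS ((hmem v).mpr ⟨h, hv⟩)
    simp [specF, hneg]

lemma B_eq_spec (l : List Int) :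
    make_cluster_values_adjacent_alt l = l.map (specF l) := by
  have hs : (sortedS l).Pairwise (· < ·) := PySem.List.sorted_ofList_pairwise_lt _
  have hmem : ∀ v, v ∈ sortedS l ↔ 0 ≤ v ∧ v ∈ l := by
    intro v
    rw [sortedS, PySem.List.mem_sorted, PySem.Set.mem_ofList, List.mem_filter]
    simp [and_comm]
  exact List.map_congr_left (fun v hv => rank_getD l (sortedS l) hs hmem v hv)

-- ===== VERDICT (by name: the statement is the Claim_ definition above) =====
theorem make_cluster_values_adjacent_spec : Claim_equal_make_cluster_values_adjacent := by
  intro l _ hpre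
  unfold Spec_make_cluster_values_adjacent
  rw [A_eq_spec l hpre, B_eq_spec l]
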